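-- pv_equiv track=rewrite | github.com/yunzhuuuuu/fox-bot | robot/software/eye_display.py | eye_with_position
-- ===== SOURCE A (Python) =====
-- def eye_with_position(position):
--     """
--     Generates an array with 1's in a circle-like shape at a given coordinate.
--
--     Args:
--         position (tuple): x and y coordinates of upper left corner of circle
--
--     Returns:
--         2D array of 0's and 1's representing the eye
--     """
--
--     x = position[0]
--     y = position[1]
--
--     eye = [
--         [0, 0, 0, 0, 0, 0, 0, 0],
--         [0, 0, 0, 0, 0, 0, 0, 0],
--         [0, 0, 0, 0, 0, 0, 0, 0],
--         [0, 0, 0, 0, 0, 0, 0, 0],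
--         [0, 0, 0, 0, 0, 0, 0, 0],
--         [0, 0, 0, 0, 0, 0, 0, 0],
--         [0, 0, 0, 0, 0, 0, 0, 0],
--         [0, 0, 0, 0, 0, 0, 0, 0],
--     ]
--
--     for row in range(8):
--         if row == y or row == y + 4:  # first and last rows (3 pixels)
--             for col in range(8):
--                 if col > x and col < x + 4:
--                     eye[row][col] = 1
--         elif row > y and row < y + 4:  # middle rows (5 pixels)
--             for col in range(8):
--                 if col >= x and col <= x + 4:
--                     eye[row][col] = 1
--
--     return eye
-- ===== SOURCE B (Python) =====
-- # The eye shape as a fixed table of offsets from the given corner.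
-- _OFFSETS = [(dr, dc)
--             for dr in range(5)
--             for dc in (range(1, 4) if dr in (0, 4) else range(5))]
--
-- def eye_with_position(position):
--     x, y = position[0], position[1]
--     eye = [[0] * 8 for _ in range(8)]
--     for dr, dc in _OFFSETS:
--         r, c = y + dr, x + dc
--         if 0 <= r < 8 and 0 <= c < 8:
--             eye[r][c] = 1
--     return eye
-- ===== Notes on version B (the rewrite author's own statement) =====
-- stated objective: simpler
-- what changed: B iterates the eye shape's 21 fixed (dr,dc) offset cells and places each onto a zero grid with a bounds guard, instead of A's scan of all 64 grid cells testing each row/column against the position.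
import Mathlib
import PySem

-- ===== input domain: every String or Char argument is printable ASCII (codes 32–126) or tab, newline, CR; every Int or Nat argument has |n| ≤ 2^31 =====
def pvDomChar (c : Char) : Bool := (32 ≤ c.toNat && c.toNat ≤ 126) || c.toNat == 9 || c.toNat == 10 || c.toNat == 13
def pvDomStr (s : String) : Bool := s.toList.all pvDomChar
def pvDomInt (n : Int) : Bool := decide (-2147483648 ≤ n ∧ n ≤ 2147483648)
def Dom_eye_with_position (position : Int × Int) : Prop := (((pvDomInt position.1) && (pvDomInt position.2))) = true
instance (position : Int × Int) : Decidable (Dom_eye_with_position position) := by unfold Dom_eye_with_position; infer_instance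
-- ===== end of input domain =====

-- B replaces A's scan of all 64 grid cells (with per-cell membership tests) by placing the
-- shape's 21 fixed offset cells onto a zero grid, clipped to the 8x8 bounds (objective: simpler).

-- ===== PORT A =====
-- eye[row][col] = 1 : row, col come from range(8), so they are nonnegative and in
-- range; List.set with .toNat is exact here (no negative-index or IndexError case).
def eye_with_position (position : Int × Int) : List (List Int) :=
  let x := position.1
  let y := position.2
  let eye : List (List Int) :=
    [ [0, 0, 0, 0, 0, 0, 0, 0],
      [0, 0, 0, 0, 0, 0, 0, 0],
      [0, 0, 0, 0, 0, 0, 0, 0],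
      [0, 0, 0, 0, 0, 0, 0, 0],
      [0, 0, 0, 0, 0, 0, 0, 0],
      [0, 0, 0, 0, 0, 0, 0, 0],
      [0, 0, 0, 0, 0, 0, 0, 0],
      [0, 0, 0, 0, 0, 0, 0, 0] ]
  (PySem.List.pyRange 0 8 1).foldl (fun eye row =>
    if row = y ∨ row = y + 4 then  -- first and last rows (3 pixels)
      (PySem.List.pyRange 0 8 1).foldl (fun eye col =>
        if col > x ∧ col < x + 4 then
          eye.set row.toNat ((eye.getD row.toNat []).set col.toNat 1)
        else eye) eye
    else if row > y ∧ row < y + 4 then  -- middle rows (5 pixels)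
      (PySem.List.pyRange 0 8 1).foldl (fun eye col =>
        if col ≥ x ∧ col ≤ x + 4 then
          eye.set row.toNat ((eye.getD row.toNat []).set col.toNat 1)
        else eye) eye
    else eye) eye

-- ===== PORT B =====
-- the fixed offset table _OFFSETS of Source B, written out
def eyeOffsets : List (Int × Int) :=
  [(0,1),(0,2),(0,3),
   (1,0),(1,1),(1,2),(1,3),(1,4),
   (2,0),(2,1),(2,2),(2,3),(2,4),
   (3,0),(3,1),(3,2),(3,3),(3,4),
   (4,1),(4,2),(4,3)]

-- eye[r][c] = 1 happens only under the explicit 0 ≤ r < 8 and 0 ≤ c < 8 guard,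
-- so List.set with .toNat is exact here as well.
def eye_with_position_alt (position : Int × Int) : List (List Int) :=
  let x := position.1
  let y := position.2
  let eye : List (List Int) := List.replicate 8 (List.replicate 8 0)
  eyeOffsets.foldl (fun eye d =>
    let r := y + d.1
    let c := x + d.2
    if 0 ≤ r ∧ r < 8 ∧ 0 ≤ c ∧ c < 8 then
      eye.set r.toNat ((eye.getD r.toNat []).set c.toNat 1)
    else eye) eye

-- ===== PRECONDITION & SPEC =====
def Spec_eye_with_position (position : Int × Int) (out : List (List Int)) : Prop := out = eye_with_position_alt position
instance (position : Int × Int) (out : List (List Int)) : Decidable (Spec_eye_with_position position out) := by unfold Spec_eye_with_position; infer_instance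

-- ===== CLAIM (what is proved, stated in full; the proofs are below) =====
def Claim_equal_eye_with_position : Prop := ∀ (position : Int × Int), Dom_eye_with_position position → Spec_eye_with_position position (eye_with_position position)

-- ===== LEMMAS AND PROOFS =====

-- a fold whose step fixes the accumulator on every element of the list returns its initial value
theorem foldl_fix {α β : Type} (l : List β) (f : α → β → α) (init : α)
    (h : ∀ acc x, x ∈ l → f acc x = acc) : l.foldl f init = init := by
  induction l generalizing init with
  | nil => rfl
  | cons a t ih =>
    rw [List.foldl_cons, h init a (by simp)]
    exact ih init (fun acc x hx => h acc x (List.mem_cons_of_mem _ hx))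

def zeroGrid : List (List Int) := List.replicate 8 (List.replicate 8 0)

-- when the shape lies entirely off-grid, A marks no cell
theorem A_zero (x y : Int) (h : (y < -4 ∨ 7 < y) ∨ (x < -4 ∨ 7 < x)) :
    eye_with_position (x, y) = zeroGrid := by
  simp only [eye_with_position]
  rw [foldl_fix]
  · decide
  · intro acc row hrow
    rw [PySem.List.mem_pyRange_one] at hrow
    rcases h with hy | hx
    · rw [if_neg (by omega), if_neg (by omega)]
    · split_ifs with h1 h2
      · exact foldl_fix _ _ _ (fun acc col hcol => by
          rw [PySem.List.mem_pyRange_one] at hcol; rw [if_neg (by omega)])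
      · exact foldl_fix _ _ _ (fun acc col hcol => by
          rw [PySem.List.mem_pyRange_one] at hcol; rw [if_neg (by omega)])
      · rfl

-- when the shape lies entirely off-grid, B's bounds guard rejects every offset
theorem B_zero (x y : Int) (h : (y < -4 ∨ 7 < y) ∨ (x < -4 ∨ 7 < x)) :
    eye_with_position_alt (x, y) = zeroGrid := by
  simp only [eye_with_position_alt]
  rw [foldl_fix]
  · decide
  · intro acc d hd
    have hb : 0 ≤ d.1 ∧ d.1 ≤ 4 ∧ 0 ≤ d.2 ∧ d.2 ≤ 4 := by
      fin_cases hd <;> simp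
    rw [if_neg (by omega)]

theorem AB_eq (x y : Int) : eye_with_position (x, y) = eye_with_position_alt (x, y) := by
  by_cases hy : -4 ≤ y ∧ y ≤ 7
  · by_cases hx : -4 ≤ x ∧ x ≤ 7
    · obtain ⟨hy1, hy2⟩ := hy; obtain ⟨hx1, hx2⟩ := hx
      interval_cases x <;> interval_cases y <;> decide
    · rw [A_zero x y (Or.inr (by omega)), B_zero x y (Or.inr (by omega))]
  · rw [A_zero x y (Or.inl (by omega)), B_zero x y (Or.inl (by omega))]

-- ===== VERDICT (by name: the statement is the Claim_ definition above) =====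
theorem eye_with_position_spec : Claim_equal_eye_with_position := by
  intro position _
  unfold Spec_eye_with_position
  obtain ⟨x, y⟩ := position
  exact AB_eq x y
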